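-- pv_equiv track=rewrite | github.com/sonambharti/Python | Array/SpiralMatrix/boundarySum.py | boundarySum
-- ===== SOURCE A (Python) =====
-- def boundarySum(n, arr):
--     # code here
--     """
--             l   r
--         t [ 1 2 3 ],
--           [ 4 5 6 ],  = [(1+2+3+6+9+8+7+4),5] = [40, 5]
--         b [ 7 8 9 ]
--
--
--     """
--     res = []
--     l, t = 0, 0
--     r, b = n, n
--
--
--     while l < r and t < b:
--         summ = 0
--         for i in range(l, r):
--             summ += arr[t][i]
--         t += 1
--
--         for i in range(t, b):
--             summ += arr[i][r-1]
--         r -= 1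
--
--         for i in range(r-1, l-1, -1):
--             summ += arr[b-1][i]
--         b -= 1
--
--         for i in range(b-1, t-1, -1):
--             summ += arr[i][l]
--         l += 1
--         res.append(summ)
--     return res
-- ===== SOURCE B (Python) =====
-- def boundarySum(n, arr):
--     # Classify each cell into its concentric ring k = min(i, j, n-1-i, n-1-j)
--     # and accumulate; ring 0 is the outermost, matching the boundary walk.
--     res = [0] * ((n + 1) // 2)
--     for i in range(n):
--         for j in range(n):
--             res[min(i, j, n - 1 - i, n - 1 - j)] += arr[i][j]
--     return res
-- ===== Notes on version B (the rewrite author's own statement) =====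
-- stated objective: simpler
-- what changed: Replaces the four-pointer boundary walk (l/r/t/b shrinking window) by a single nested loop that classifies each cell into its ring index min(i,j,n-1-i,n-1-j) and accumulates into a preallocated result list.
import Mathlib
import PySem

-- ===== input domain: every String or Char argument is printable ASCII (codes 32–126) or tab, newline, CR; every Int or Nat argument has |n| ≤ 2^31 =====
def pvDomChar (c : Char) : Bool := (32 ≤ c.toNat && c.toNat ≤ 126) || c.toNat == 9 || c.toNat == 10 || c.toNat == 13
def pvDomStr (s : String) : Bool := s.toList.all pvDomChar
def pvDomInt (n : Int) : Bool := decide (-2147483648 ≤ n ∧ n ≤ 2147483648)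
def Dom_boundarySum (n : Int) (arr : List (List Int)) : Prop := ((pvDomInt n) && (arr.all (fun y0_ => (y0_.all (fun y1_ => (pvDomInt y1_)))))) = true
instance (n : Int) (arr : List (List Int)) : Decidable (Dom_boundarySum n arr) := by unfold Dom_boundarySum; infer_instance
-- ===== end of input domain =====

-- B replaces A's four-pointer boundary walk by a single nested loop that adds each
-- cell arr[i][j] into ring index min(i, j, n-1-i, n-1-j): simpler, same O(n^2) cost.


-- ===== PORT A =====
-- A's while loop over the state (l, t, r, b, res)
def pvLoopA (arr : List (List Int)) (l t r b : Int) (res : List Int) : List Int :=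
  if _h : l < r ∧ t < b then
    let s0 := (PySem.List.pyRange l r 1).foldl
      (fun s i => s + PySem.List.pyGetD (PySem.List.pyGetD arr t []) i 0) 0
    let t1 := t + 1
    let s1 := (PySem.List.pyRange t1 b 1).foldl
      (fun s i => s + PySem.List.pyGetD (PySem.List.pyGetD arr i []) (r - 1) 0) s0
    let r1 := r - 1
    let s2 := (PySem.List.pyRange (r1 - 1) (l - 1) (-1)).foldl
      (fun s i => s + PySem.List.pyGetD (PySem.List.pyGetD arr (b - 1) []) i 0) s1
    let b1 := b - 1
    let s3 := (PySem.List.pyRange (b1 - 1) (t1 - 1) (-1)).foldl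
      (fun s i => s + PySem.List.pyGetD (PySem.List.pyGetD arr i []) l 0) s2
    pvLoopA arr (l + 1) t1 r1 b1 (res ++ [s3])
  else res
termination_by (b - t).toNat
decreasing_by omega

def boundarySum (n : Int) (arr : List (List Int)) : List Int :=
  pvLoopA arr 0 0 n n []

-- ===== PORT B =====
def boundarySum_alt (n : Int) (arr : List (List Int)) : List Int :=
  let res0 : List Int := List.replicate (PySem.Int.floordiv (n + 1) 2).toNat 0
  (PySem.List.pyRange 0 n 1).foldl (fun res i =>
    (PySem.List.pyRange 0 n 1).foldl (fun res j =>
      let k := min (min i j) (min (n - 1 - i) (n - 1 - j))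
      PySem.List.pySetD res k (PySem.List.pyGetD res k 0 +
        PySem.List.pyGetD (PySem.List.pyGetD arr i []) j 0)) res) res0

-- ===== PRECONDITION & SPEC =====
-- Pre_ excludes exactly the inputs where Python A raises IndexError: A reads
-- arr[i][j] for all 0 ≤ i, j < n, so arr must have at least n rows and each of
-- the first n rows at least n columns (for n ≤ 0 both loops are empty and A is total).
def Pre_boundarySum (n : Int) (arr : List (List Int)) : Prop :=
  n ≤ (arr.length : Int) ∧ ∀ row ∈ arr.take n.toNat, n ≤ (row.length : Int)
instance (n : Int) (arr : List (List Int)) : Decidable (Pre_boundarySum n arr) := by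
  unfold Pre_boundarySum; infer_instance

def pvWitness_boundarySum : Int × List (List Int) := (3, [[1,2,3],[4,5,6],[7,8,9]])

def Spec_boundarySum (n : Int) (arr : List (List Int)) (out : List Int) : Prop := out = boundarySum_alt n arr
instance (n : Int) (arr : List (List Int)) (out : List Int) : Decidable (Spec_boundarySum n arr out) := by unfold Spec_boundarySum; infer_instance

-- ===== CLAIM (what is proved, stated in full; the proofs are below) =====
def Claim_equal_boundarySum : Prop := ∀ (n : Int) (arr : List (List Int)), Dom_boundarySum n arr → Pre_boundarySum n arr → Spec_boundarySum n arr (boundarySum n arr)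

-- ===== LEMMAS AND PROOFS =====

-- the matrix cell read both ports perform (with defaults; in range under Pre_)
def pvG (arr : List (List Int)) (i j : Int) : Int :=
  PySem.List.pyGetD (PySem.List.pyGetD arr i []) j 0

-- ring index of cell (i, j)
def pvKey (n i j : Int) : Int := min (min i j) (min (n - 1 - i) (n - 1 - j))

-- the value one iteration of A's while loop appends (for state l = t = k, r = b = n - k)
def pvSA (n : Int) (arr : List (List Int)) (k : Int) : Int :=
  ((PySem.List.pyRange k (n - k) 1).map (fun j => pvG arr k j)).sum
  + ((PySem.List.pyRange (k + 1) (n - k) 1).map (fun i => pvG arr i (n - k - 1))).sum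
  + ((PySem.List.pyRange k (n - k - 1) 1).map (fun j => pvG arr (n - k - 1) j)).sum
  + ((PySem.List.pyRange (k + 1) (n - k - 1) 1).map (fun i => pvG arr i k)).sum

-- row i's contribution to ring k in B
def pvInner (n : Int) (arr : List (List Int)) (k i : Int) : Int :=
  ((PySem.List.pyRange 0 n 1).map (fun j => if pvKey n i j = k then pvG arr i j else 0)).sum

-- the value B accumulates at ring index k
def pvRing (n : Int) (arr : List (List Int)) (k : Int) : Int :=
  ((PySem.List.pyRange 0 n 1).map (pvInner n arr k)).sum

theorem pvLoopA_eq (n : Int) (arr : List (List Int)) :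
    ∀ (d : Nat) (k : Int) (res : List Int), (n - 2 * k).toNat ≤ d →
    pvLoopA arr k k (n - k) (n - k) res =
      res ++ (PySem.List.pyRange k (PySem.Int.floordiv (n + 1) 2) 1).map (pvSA n arr) := by
  intro d
  induction d with
  | zero =>
    intro k res hd
    rw [pvLoopA]
    rw [dif_neg (by omega)]
    rw [PySem.List.pyRange_one_eq_nil (by
      rw [PySem.Int.floordiv_eq_ediv_of_pos (by omega : (0:Int) < 2)]; omega)]
    simp
  | succ d ih =>
    intro k res hd
    rw [pvLoopA]
    by_cases hc : k < n - k
    · rw [dif_pos ⟨hc, hc⟩]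
      dsimp only
      have hrec := ih (k + 1) (res ++ [pvSA n arr k]) (by omega)
      have hstep : n - (k + 1) = n - k - 1 := by omega
      rw [hstep] at hrec
      have hs3 :
          ((PySem.List.pyRange (n - k - 1 - 1) (k + 1 - 1) (-1)).foldl
            (fun s i => s + PySem.List.pyGetD (PySem.List.pyGetD arr i []) k 0)
            ((PySem.List.pyRange (n - k - 1 - 1) (k - 1) (-1)).foldl
              (fun s i => s + PySem.List.pyGetD (PySem.List.pyGetD arr (n - k - 1) []) i 0)
              ((PySem.List.pyRange (k + 1) (n - k) 1).foldl
                (fun s i => s + PySem.List.pyGetD (PySem.List.pyGetD arr i []) (n - k - 1) 0)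
                ((PySem.List.pyRange k (n - k) 1).foldl
                  (fun s i => s + PySem.List.pyGetD (PySem.List.pyGetD arr k []) i 0) 0)))) =
          pvSA n arr k := by
        rw [PySem.List.foldl_add, PySem.List.foldl_add, PySem.List.foldl_add, PySem.List.foldl_add]
        rw [PySem.List.pyRange_neg_one_eq_reverse, PySem.List.pyRange_neg_one_eq_reverse]
        have e1 : k - 1 + 1 = k := by omega
        have e2 : n - k - 1 - 1 + 1 = n - k - 1 := by omega
        have e3 : k + 1 - 1 + 1 = k + 1 := by omega
        rw [e1, e2, e3]
        simp only [List.map_reverse, List.sum_reverse]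
        unfold pvSA pvG
        ring
      have hkK : k < PySem.Int.floordiv (n + 1) 2 := by
        rw [PySem.Int.floordiv_eq_ediv_of_pos (by omega : (0:Int) < 2)]; omega
      rw [hs3, hrec, PySem.List.pyRange_one_cons hkK]
      simp
    · have hKk : PySem.Int.floordiv (n + 1) 2 ≤ k := by
        rw [PySem.Int.floordiv_eq_ediv_of_pos (by omega : (0:Int) < 2)]; omega
      rw [dif_neg (by omega), PySem.List.pyRange_one_eq_nil hKk]
      simp

theorem pvA_char (n : Int) (arr : List (List Int)) :
    boundarySum n arr = (PySem.List.pyRange 0 (PySem.Int.floordiv (n + 1) 2) 1).map (pvSA n arr) := by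
  have h := pvLoopA_eq n arr n.toNat 0 [] (by omega)
  simpa using h

theorem pv_foldAdd (us : List (Int × Int)) : ∀ (res : List Int),
    (∀ p ∈ us, 0 ≤ p.1 ∧ p.1 < (res.length : Int)) →
    (us.foldl (fun r p => PySem.List.pySetD r p.1 (PySem.List.pyGetD r p.1 0 + p.2)) res).length = res.length ∧
    ∀ k : Nat, (us.foldl (fun r p => PySem.List.pySetD r p.1 (PySem.List.pyGetD r p.1 0 + p.2)) res).getD k 0 =
      res.getD k 0 + (us.map (fun p => if p.1 = (k : Int) then p.2 else 0)).sum := by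
  induction us with
  | nil => intro res _; simp
  | cons p us ih =>
    intro res hb
    obtain ⟨hq, hqlt⟩ := hb p (by simp)
    have hqn : p.1.toNat < res.length := by omega
    have hset : PySem.List.pySetD res p.1 (PySem.List.pyGetD res p.1 0 + p.2) =
        res.set p.1.toNat (res.getD p.1.toNat 0 + p.2) := by
      rw [PySem.List.pySetD_of_nonneg _ _ hq, PySem.List.pyGetD_eq_getElem _ _ hq hqlt,
        List.getD_eq_getElem res 0 hqn]
    obtain ⟨ihlen, ihget⟩ := ih (res.set p.1.toNat (res.getD p.1.toNat 0 + p.2))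
      (by intro q hqmem; simpa using hb q (by simp [hqmem]))
    constructor
    · simp only [List.foldl_cons, hset, ihlen, List.length_set]
    · intro k
      simp only [List.foldl_cons, hset, ihget k, List.map_cons, List.sum_cons]
      have hgd : (res.set p.1.toNat (res.getD p.1.toNat 0 + p.2)).getD k 0 =
          res.getD k 0 + (if p.1 = (k : Int) then p.2 else 0) := by
        by_cases hk : p.1 = (k : Int)
        · obtain rfl : k = p.1.toNat := by omega
          rw [if_pos hk, List.getD_eq_getElem?_getD, List.getElem?_set]
          simp [hqn]
        · have hne : p.1.toNat ≠ k := by omega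
          simp [hk, List.getD_eq_getElem?_getD, hne]
      rw [hgd]; ring

theorem pv_sum_flatMap (l : List Int) (g : Int → List Int) :
    (l.flatMap g).sum = (l.map (fun x => (g x).sum)).sum := by
  induction l with
  | nil => simp
  | cons x xs ih => simp [ih]

theorem pvB_char (n : Int) (arr : List (List Int)) :
    boundarySum_alt n arr = (PySem.List.pyRange 0 (PySem.Int.floordiv (n + 1) 2) 1).map (pvRing n arr) := by
  have h2 : (0:Int) < 2 := by omega
  set K := PySem.Int.floordiv (n + 1) 2 with hK
  set res0 : List Int := List.replicate K.toNat 0 with hres0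
  set us : List (Int × Int) := (PySem.List.pyRange 0 n 1).flatMap (fun i =>
    (PySem.List.pyRange 0 n 1).map (fun j => (pvKey n i j, pvG arr i j))) with hus
  have hstep : boundarySum_alt n arr =
      us.foldl (fun r p => PySem.List.pySetD r p.1 (PySem.List.pyGetD r p.1 0 + p.2)) res0 := by
    rw [hus, List.foldl_flatMap]
    simp only [List.foldl_map]
    rfl
  have hb : ∀ p ∈ us, 0 ≤ p.1 ∧ p.1 < (res0.length : Int) := by
    intro p hp
    rw [hus] at hp
    simp only [List.mem_flatMap, List.mem_map] at hp
    obtain ⟨i, hi, j, hj, rfl⟩ := hp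
    rw [PySem.List.mem_pyRange_one] at hi hj
    have hn : 0 < n := by omega
    have hKv : K = (n + 1) / 2 := by rw [hK, PySem.Int.floordiv_eq_ediv_of_pos h2]
    have hlen : (res0.length : Int) = K := by
      rw [hres0]; simp; omega
    rw [hlen]
    constructor
    · simp only [pvKey]; omega
    · simp only [pvKey]; omega
  obtain ⟨hlen, hget⟩ := pv_foldAdd us res0 hb
  rw [hstep]
  apply List.ext_getElem
  · rw [hlen, hres0]
    simp [PySem.List.length_pyRange_one]
  · intro k h1 h2'
    rw [List.getElem_map, PySem.List.getElem_pyRange_one]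
    rw [← List.getD_eq_getElem _ 0 h1, hget k]
    have : res0.getD k 0 = 0 := by rw [hres0]; simp [List.getD_eq_getElem?_getD]
    rw [this, hus, List.map_flatMap, pv_sum_flatMap]
    simp only [List.map_map, pvRing, Function.comp_def, zero_add]
    rfl

theorem pvInner_zero (n : Int) (arr : List (List Int)) (k i : Int)
    (h : i < k ∨ n - k ≤ i) : pvInner n arr k i = 0 := by
  apply List.sum_eq_zero
  intro x hx
  obtain ⟨j, hj, rfl⟩ := List.mem_map.mp hx
  rw [PySem.List.mem_pyRange_one] at hj
  rw [if_neg]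
  simp only [pvKey]
  omega

theorem pvInner_edge (n : Int) (arr : List (List Int)) (k i : Int)
    (hk : 0 ≤ k) (hkn : 2 * k < n) (h : i = k ∨ i = n - k - 1) :
    pvInner n arr k i = ((PySem.List.pyRange k (n - k) 1).map (fun j => pvG arr i j)).sum := by
  unfold pvInner
  rw [PySem.List.pyRange_one_append 0 k n (by omega) (by omega),
    PySem.List.pyRange_one_append k (n - k) n (by omega) (by omega)]
  simp only [List.map_append, List.sum_append]
  rw [List.sum_eq_zero (by
    intro x hx
    obtain ⟨j, hj, rfl⟩ := List.mem_map.mp hx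
    rw [PySem.List.mem_pyRange_one] at hj
    rw [if_neg]; simp only [pvKey]; omega)]
  rw [List.sum_eq_zero (l := (PySem.List.pyRange (n - k) n 1).map _) (by
    intro x hx
    obtain ⟨j, hj, rfl⟩ := List.mem_map.mp hx
    rw [PySem.List.mem_pyRange_one] at hj
    rw [if_neg]; simp only [pvKey]; omega)]
  rw [List.map_congr_left (l := PySem.List.pyRange k (n - k) 1) (f := fun j => if pvKey n i j = k then pvG arr i j else 0) (g := fun j => pvG arr i j) (by
    intro j hj
    rw [PySem.List.mem_pyRange_one] at hj
    simp only [pvKey]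
    rw [if_pos (by omega)])]
  ring

theorem pvInner_mid (n : Int) (arr : List (List Int)) (k i : Int)
    (hk : 0 ≤ k) (h1 : k < i) (h2 : i < n - k - 1) :
    pvInner n arr k i = pvG arr i k + pvG arr i (n - k - 1) := by
  unfold pvInner
  rw [PySem.List.pyRange_one_append 0 k n (by omega) (by omega),
    PySem.List.pyRange_one_append k (k + 1) n (by omega) (by omega),
    PySem.List.pyRange_one_append (k + 1) (n - k - 1) n (by omega) (by omega),
    PySem.List.pyRange_one_append (n - k - 1) (n - k) n (by omega) (by omega)]
  simp only [List.map_append, List.sum_append]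
  rw [List.sum_eq_zero (l := (PySem.List.pyRange 0 k 1).map _) (by
    intro x hx
    obtain ⟨j, hj, rfl⟩ := List.mem_map.mp hx
    rw [PySem.List.mem_pyRange_one] at hj
    rw [if_neg]; simp only [pvKey]; omega)]
  rw [List.sum_eq_zero (l := (PySem.List.pyRange (k + 1) (n - k - 1) 1).map _) (by
    intro x hx
    obtain ⟨j, hj, rfl⟩ := List.mem_map.mp hx
    rw [PySem.List.mem_pyRange_one] at hj
    rw [if_neg]; simp only [pvKey]; omega)]
  rw [List.sum_eq_zero (l := (PySem.List.pyRange (n - k) n 1).map _) (by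
    intro x hx
    obtain ⟨j, hj, rfl⟩ := List.mem_map.mp hx
    rw [PySem.List.mem_pyRange_one] at hj
    rw [if_neg]; simp only [pvKey]; omega)]
  have hsing : PySem.List.pyRange (n - k - 1) (n - k) 1 = [n - k - 1] := by
    rw [PySem.List.pyRange_one_cons (by omega), PySem.List.pyRange_one_eq_nil (by omega)]
  rw [PySem.List.pyRange_one_singleton, hsing]
  simp only [List.map_cons, List.map_nil, List.sum_cons, List.sum_nil]
  rw [if_pos (by simp only [pvKey]; omega), if_pos (by simp only [pvKey]; omega)]
  ring

theorem pvSA_eq_pvRing (n : Int) (arr : List (List Int)) (k : Int)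
    (hk : 0 ≤ k) (hkn : 2 * k < n) : pvSA n arr k = pvRing n arr k := by
  by_cases hodd : n = 2 * k + 1
  · -- center ring: a single cell
    subst hodd
    unfold pvRing
    rw [PySem.List.pyRange_one_append 0 k (2 * k + 1) (by omega) (by omega),
      PySem.List.pyRange_one_append k (k + 1) (2 * k + 1) (by omega) (by omega)]
    simp only [List.map_append, List.sum_append]
    rw [List.sum_eq_zero (l := (PySem.List.pyRange 0 k 1).map _) (by
      intro x hx
      obtain ⟨i, hi, rfl⟩ := List.mem_map.mp hx
      rw [PySem.List.mem_pyRange_one] at hi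
      exact pvInner_zero _ arr k i (by omega))]
    rw [List.sum_eq_zero (l := (PySem.List.pyRange (k + 1) (2 * k + 1) 1).map _) (by
      intro x hx
      obtain ⟨i, hi, rfl⟩ := List.mem_map.mp hx
      rw [PySem.List.mem_pyRange_one] at hi
      exact pvInner_zero _ arr k i (by omega))]
    rw [PySem.List.pyRange_one_singleton]
    simp only [List.map_cons, List.map_nil, List.sum_cons, List.sum_nil]
    rw [pvInner_edge _ arr k k hk (by omega) (Or.inl rfl)]
    unfold pvSA
    rw [PySem.List.pyRange_one_eq_nil (a := k + 1) (by omega),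
      PySem.List.pyRange_one_eq_nil (a := k) (b := 2 * k + 1 - k - 1) (by omega),
      PySem.List.pyRange_one_eq_nil (a := k + 1) (b := 2 * k + 1 - k - 1) (by omega)]
    simp
  · -- proper ring: two full rows and two side columns
    have hlt : k + 1 ≤ n - k - 1 := by omega
    unfold pvRing
    rw [PySem.List.pyRange_one_append 0 k n (by omega) (by omega),
      PySem.List.pyRange_one_append k (k + 1) n (by omega) (by omega),
      PySem.List.pyRange_one_append (k + 1) (n - k - 1) n (by omega) (by omega),
      PySem.List.pyRange_one_append (n - k - 1) (n - k) n (by omega) (by omega)]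
    simp only [List.map_append, List.sum_append]
    rw [List.sum_eq_zero (l := (PySem.List.pyRange 0 k 1).map _) (by
      intro x hx
      obtain ⟨i, hi, rfl⟩ := List.mem_map.mp hx
      rw [PySem.List.mem_pyRange_one] at hi
      exact pvInner_zero _ arr k i (by omega))]
    rw [List.sum_eq_zero (l := (PySem.List.pyRange (n - k) n 1).map _) (by
      intro x hx
      obtain ⟨i, hi, rfl⟩ := List.mem_map.mp hx
      rw [PySem.List.mem_pyRange_one] at hi
      exact pvInner_zero _ arr k i (by omega))]
    have hsing : PySem.List.pyRange (n - k - 1) (n - k) 1 = [n - k - 1] := by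
      rw [PySem.List.pyRange_one_cons (by omega), PySem.List.pyRange_one_eq_nil (by omega)]
    rw [PySem.List.pyRange_one_singleton, hsing]
    simp only [List.map_cons, List.map_nil, List.sum_cons, List.sum_nil]
    rw [pvInner_edge _ arr k k hk (by omega) (Or.inl rfl),
      pvInner_edge _ arr k (n - k - 1) hk (by omega) (Or.inr rfl)]
    rw [List.map_congr_left (l := PySem.List.pyRange (k + 1) (n - k - 1) 1)
      (f := pvInner n arr k) (g := fun i => pvG arr i k + pvG arr i (n - k - 1)) (by
      intro i hi
      rw [PySem.List.mem_pyRange_one] at hi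
      exact pvInner_mid n arr k i hk (by omega) (by omega))]
    rw [PySem.List.sum_map_add_int]
    unfold pvSA
    rw [PySem.List.pyRange_one_append k (n - k - 1) (n - k) (by omega) (by omega),
      PySem.List.pyRange_one_append (k + 1) (n - k - 1) (n - k) (by omega) (by omega), hsing]
    simp only [List.map_append, List.sum_append, List.map_cons, List.map_nil,
      List.sum_cons, List.sum_nil]
    ring

-- ===== VERDICT (by name: the statement is the Claim_ definition above) =====
theorem boundarySum_spec : Claim_equal_boundarySum := by
  intro n arr _ _
  unfold Spec_boundarySum
  rw [pvA_char, pvB_char]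
  refine List.map_congr_left (fun k hk => ?_)
  rw [PySem.List.mem_pyRange_one] at hk
  have h2 : 0 < (2:Int) := by omega
  rw [PySem.Int.floordiv_eq_ediv_of_pos h2] at hk
  exact pvSA_eq_pvRing n arr k hk.1 (by omega)
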